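-- pv_equiv track=rewrite | github.com/madshoffnielsen/AdventOfCode | 2023/Day03/index.py | find_numbers_with_positions
-- ===== SOURCE A (Python) =====
-- def find_numbers_with_positions(grid):
--     numbers = []
--     height, width = len(grid), len(grid[0])
--
--     for row in range(height):
--         current_num = ''
--         start_col = None
--
--         for col in range(width + 1):
--             if col < width and grid[row][col].isdigit():
--                 if start_col is None:
--                     start_col = col
--                 current_num += grid[row][col]
--             elif current_num:
--                 numbers.append((int(current_num), row, start_col, col-1))
--                 current_num = ''
--                 start_col = None
--
--     return numbers
-- ===== SOURCE B (Python) =====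
-- def find_numbers_with_positions(grid):
--     numbers = []
--     width = len(grid[0])
--     for row, line in enumerate(grid):
--         cells = line[:width]
--         i, n = 0, len(cells)
--         while i < n:
--             if cells[i].isdigit():
--                 j = i + 1
--                 while j < n and cells[j].isdigit():
--                     j += 1
--                 numbers.append((int(cells[i:j]), row, i, j - 1))
--                 i = j
--             else:
--                 i += 1
--     return numbers
-- ===== Notes on version B (the rewrite author's own statement) =====
-- stated objective: alternative
-- what changed: Replaces A's per-character accumulator with start_col tracking and a range(width+1) sentinel flush by per-row two-pointer run extraction: find a digit, advance a second index past the run, slice it out in one step.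
-- crash fix: A raises IndexError on the empty grid (both do) and on any grid whose first row is longer than some other row; on the latter B simply scans each row's first-width-characters prefix and returns the numbers found there. — e.g. on find_numbers_with_positions(["12.", "7"]): A raises IndexError, B returns [(12, 0, 0, 1), (7, 1, 0, 0)]
import Mathlib
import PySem

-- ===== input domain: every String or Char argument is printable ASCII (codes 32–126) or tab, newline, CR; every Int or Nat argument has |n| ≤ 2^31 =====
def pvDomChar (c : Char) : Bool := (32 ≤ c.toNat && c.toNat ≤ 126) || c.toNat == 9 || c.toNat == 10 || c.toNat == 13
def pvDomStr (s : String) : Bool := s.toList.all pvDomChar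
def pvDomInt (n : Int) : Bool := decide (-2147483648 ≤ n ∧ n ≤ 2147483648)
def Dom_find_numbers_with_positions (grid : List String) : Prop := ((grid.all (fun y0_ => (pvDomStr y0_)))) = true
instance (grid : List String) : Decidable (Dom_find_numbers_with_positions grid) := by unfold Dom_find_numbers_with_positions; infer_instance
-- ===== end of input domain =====

-- B replaces A's per-character accumulator + range(width+1) sentinel flush by per-row two-pointer digit-run extraction (alternative structure, similar cost; not measured faster).


-- ===== PORT A =====
-- inner-loop step of A; state = (numbers, current_num, start_col)
def pvAStep (ln : List Char) (width row : Int)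
    (s : List (Int × Int × Int × Int) × List Char × Option Int) (col : Int) :
    List (Int × Int × Int × Int) × List Char × Option Int :=
  let (nums, cur, start) := s
  if col < width ∧ PySem.Chars.isdigit ((PySem.List.pyGet? ln col).getD ' ') then
    (nums,
     cur ++ [(PySem.List.pyGet? ln col).getD ' '],
     match start with | none => some col | some s0 => some s0)
  else if cur ≠ [] then
    (nums ++ [((PySem.Int.ofChars? cur).getD 0, row, start.getD 0, col - 1)], [], none)
  else
    (nums, cur, start)

def find_numbers_with_positions (grid : List String) : List (Int × Int × Int × Int) :=
  let height : Int := grid.length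
  let width : Int := ((PySem.List.pyGet? grid 0).getD "").toList.length
  (PySem.List.pyRange 0 height 1).foldl
    (fun numbers row =>
      let ln := ((PySem.List.pyGet? grid row).getD "").toList
      ((PySem.List.pyRange 0 (width + 1) 1).foldl (pvAStep ln width row)
        (numbers, ([] : List Char), (none : Option Int))).1)
    []

-- ===== PORT B =====
-- inner while of B: advance j past the digit run (fuel makes the while total; it is
-- called with fuel = cells.length, enough for every iteration)
def pvBRun (cells : List Char) : Nat → Nat → Nat
  | 0, j => j
  | fuel + 1, j =>
    if h : j < cells.length then
      if PySem.Chars.isdigit cells[j] then pvBRun cells fuel (j + 1) else j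
    else j

-- outer while of B: i jumps to the end of each run
def pvBGo (row : Int) (cells : List Char) : Nat → Nat → List (Int × Int × Int × Int)
  | 0, _ => []
  | fuel + 1, i =>
    if h : i < cells.length then
      if PySem.Chars.isdigit cells[i] then
        let j := pvBRun cells cells.length (i + 1)
        ((PySem.Int.ofChars? ((cells.drop i).take (j - i))).getD 0, row, (i : Int), (j : Int) - 1)
          :: pvBGo row cells fuel j
      else pvBGo row cells fuel (i + 1)
    else []

def find_numbers_with_positions_alt (grid : List String) : List (Int × Int × Int × Int) :=
  let width : Nat := ((PySem.List.pyGet? grid 0).getD "").toList.length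
  (PySem.List.enumerate grid).foldl
    (fun numbers p => numbers ++ pvBGo p.1 (p.2.toList.take width) (p.2.toList.take width).length 0) []

-- ===== PRECONDITION & SPEC =====
-- Pre_ excludes exactly the inputs on which A raises IndexError: the empty grid, and grids
-- in which some row is shorter than row 0 (A reads grid[row][col] for every col < len(grid[0])).
def Pre_find_numbers_with_positions (grid : List String) : Prop :=
  grid ≠ [] ∧ ∀ s ∈ grid, (grid.headD "").toList.length ≤ s.toList.length
instance (grid : List String) : Decidable (Pre_find_numbers_with_positions grid) := by
  unfold Pre_find_numbers_with_positions; infer_instance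

def pvWitness_find_numbers_with_positions : List String := ["12..3", ".4..."]

-- A raises IndexError on nonempty grids in which some row is shorter than row 0; B returns
-- the numbers found in each row's first min(width, len(row)) characters.
def Raises_find_numbers_with_positions (grid : List String) : Prop :=
  grid ≠ [] ∧ ∃ s ∈ grid, s.toList.length < (grid.headD "").toList.length
instance (grid : List String) : Decidable (Raises_find_numbers_with_positions grid) := by
  unfold Raises_find_numbers_with_positions; infer_instance

def pvRaiseWitness_find_numbers_with_positions : List String := ["12.", "7"]
def pvRaiseWitnessOut_find_numbers_with_positions : List (Int × Int × Int × Int) :=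
  [(12, 0, 0, 1), (7, 1, 0, 0)]

def Spec_find_numbers_with_positions (grid : List String) (out : List (Int × Int × Int × Int)) : Prop := out = find_numbers_with_positions_alt grid
instance (grid : List String) (out : List (Int × Int × Int × Int)) : Decidable (Spec_find_numbers_with_positions grid out) := by unfold Spec_find_numbers_with_positions; infer_instance

-- ===== CLAIM (what is proved, stated in full; the proofs are below) =====
def Claim_equal_find_numbers_with_positions : Prop := ∀ (grid : List String), Dom_find_numbers_with_positions grid → Pre_find_numbers_with_positions grid → Spec_find_numbers_with_positions grid (find_numbers_with_positions grid)

def Claim_raises_find_numbers_with_positions : Prop := (∀ (grid : List String), Dom_find_numbers_with_positions grid → Raises_find_numbers_with_positions grid → ¬ Pre_find_numbers_with_positions grid) ∧ (Dom_find_numbers_with_positions (pvRaiseWitness_find_numbers_with_positions) ∧ Raises_find_numbers_with_positions (pvRaiseWitness_find_numbers_with_positions) ∧ find_numbers_with_positions_alt (pvRaiseWitness_find_numbers_with_positions) = pvRaiseWitnessOut_find_numbers_with_positions)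

-- ===== LEMMAS AND PROOFS =====

-- length of the leading digit run
def pvRunLen : List Char → Nat
  | [] => 0
  | c :: cs => if PySem.Chars.isdigit c then pvRunLen cs + 1 else 0

-- reference scanner both ports are reduced to: emit the digit runs of `rest`,
-- whose first character sits at absolute column i
def pvEmit (row : Int) : List Char → Nat → List (Int × Int × Int × Int)
  | [], _ => []
  | c :: cs, i =>
    if PySem.Chars.isdigit c then
      ((PySem.Int.ofChars? (c :: cs.take (pvRunLen cs))).getD 0, row, (i : Int),
        ((i + 1 + pvRunLen cs : Nat) : Int) - 1)
        :: pvEmit row (cs.drop (pvRunLen cs)) (i + 1 + pvRunLen cs)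
    else pvEmit row cs (i + 1)
termination_by rest => rest.length
decreasing_by
  · simp [Nat.lt_succ_of_le (Nat.sub_le _ _)]
  · simp

-- what A's inner fold produces from a mid-scan state (start = some s0 ↔ a run is open)
def pvCont (row : Int) (rest : List Char) (a : Nat) (cur : List Char) :
    Option Int → List (Int × Int × Int × Int)
  | none => pvEmit row rest a
  | some s0 =>
      ((PySem.Int.ofChars? (cur ++ rest.take (pvRunLen rest))).getD 0, row, s0,
        ((a + pvRunLen rest : Nat) : Int) - 1)
        :: pvEmit row (rest.drop (pvRunLen rest)) (a + pvRunLen rest)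

theorem pvBRun_eq (cells : List Char) (fuel j : Nat) (hf : cells.length - j ≤ fuel) :
    pvBRun cells fuel j = j + pvRunLen (cells.drop j) := by
  induction fuel generalizing j with
  | zero =>
    have : cells.drop j = [] := List.drop_eq_nil_of_le (by omega)
    simp [pvBRun, this, pvRunLen]
  | succ fuel ih =>
    by_cases h : j < cells.length
    · rw [List.drop_eq_getElem_cons h]
      by_cases hd : PySem.Chars.isdigit cells[j]
      · simp only [pvBRun, h, hd, dif_pos, if_pos, pvRunLen]
        rw [ih (j + 1) (by omega)]
        omega
      · simp [pvBRun, h, hd, pvRunLen]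
    · have : cells.drop j = [] := List.drop_eq_nil_of_le (by omega)
      simp [pvBRun, h, this, pvRunLen]

theorem pvBGo_eq (row : Int) (cells : List Char) (fuel i : Nat) (hf : cells.length - i ≤ fuel) :
    pvBGo row cells fuel i = pvEmit row (cells.drop i) i := by
  induction fuel generalizing i with
  | zero =>
    have : cells.drop i = [] := List.drop_eq_nil_of_le (by omega)
    simp [pvBGo, this, pvEmit]
  | succ fuel ih =>
    by_cases h : i < cells.length
    · rw [List.drop_eq_getElem_cons h]
      by_cases hd : PySem.Chars.isdigit cells[i]
      · have hrun : pvBRun cells cells.length (i + 1)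
            = (i + 1) + pvRunLen (cells.drop (i + 1)) := pvBRun_eq _ _ _ (by omega)
        simp only [pvBGo, h, hd, dif_pos, if_pos, pvEmit]
        rw [hrun, ih _ (by omega)]
        have h1 : (i + 1) + pvRunLen (cells.drop (i + 1)) - i
            = pvRunLen (cells.drop (i + 1)) + 1 := by omega
        have h2 : (cells.drop i).take (pvRunLen (cells.drop (i + 1)) + 1)
            = cells[i] :: (cells.drop (i + 1)).take (pvRunLen (cells.drop (i + 1))) := by
          rw [List.drop_eq_getElem_cons h, List.take_succ_cons]
        have h3 : ((i + 1 + pvRunLen (cells.drop (i + 1)) : Nat) : Int)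
            = ((i + 1) + pvRunLen (cells.drop (i + 1)) : Nat) := by omega
        rw [h1, h2]
        congr 1
        rw [List.drop_drop]
      · simp only [pvBGo, h, hd, dif_pos, if_neg, pvEmit, Bool.false_eq_true,
          not_false_iff]
        rw [ih _ (by omega)]
    · have : cells.drop i = [] := List.drop_eq_nil_of_le (by omega)
      simp [pvBGo, h, this, pvEmit]

theorem pvBGo_full (row : Int) (cells : List Char) :
    pvBGo row cells cells.length 0 = pvEmit row cells 0 := by
  rw [pvBGo_eq _ _ _ _ (by omega), List.drop_zero]

theorem foldA_eq (ln : List Char) (width : Nat) (row : Int) (hw : width ≤ ln.length)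
    (a : Nat) (ha : a ≤ width) (cur : List Char) (start : Option Int)
    (hst : start = none ↔ cur = [])
    (nums : List (Int × Int × Int × Int)) :
    ((PySem.List.pyRange (a : Int) ((width : Int) + 1) 1).foldl
        (pvAStep ln (width : Int) row) (nums, cur, start)).1
      = nums ++ pvCont row ((ln.take width).drop a) a cur start := by
  have hlen : (ln.take width).length = width := by simp [List.length_take]; omega
  have hstep : PySem.List.pyRange (a : Int) ((width : Int) + 1) 1
      = (a : Int) :: PySem.List.pyRange (((a + 1 : Nat) : Int)) ((width : Int) + 1) 1 := by
    rw [PySem.List.pyRange_one_cons (by exact_mod_cast by omega)]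
    norm_cast
  rw [hstep, List.foldl_cons]
  rcases Nat.eq_or_lt_of_le ha with heq | hlt
  · -- sentinel column a = width
    subst heq
    have hnil : (ln.take a).drop a = [] := List.drop_eq_nil_of_le (by omega)
    have hrange : PySem.List.pyRange (((a + 1 : Nat) : Int)) ((a : Int) + 1) 1 = [] := by
      apply PySem.List.pyRange_one_eq_nil
      push_cast; omega
    rw [hrange, List.foldl_nil, hnil]
    have hguard : ¬ ((a : Int) < (a : Int) ∧
        PySem.Chars.isdigit ((PySem.List.pyGet? ln (a : Int)).getD ' ')) := by
      rintro ⟨h1, -⟩; omega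
    rcases start with _ | s0
    · have hcur : cur = [] := hst.mp rfl
      subst hcur
      simp [pvAStep, pvCont, pvEmit]
    · have hcur : cur ≠ [] := by
        intro hc; exact absurd (hst.mpr hc) (by simp)
      simp [pvAStep, hcur, pvCont, pvEmit, pvRunLen]
  · -- a < width : one real column
    have haw : a < (ln.take width).length := by omega
    have hla : a < ln.length := by omega
    have hrest : (ln.take width).drop a
        = (ln.take width)[a] :: (ln.take width).drop (a + 1) :=
      List.drop_eq_getElem_cons haw
    have hgetc : (ln.take width)[a]'haw = ln[a]'hla := List.getElem_take
    have hpg : PySem.List.pyGet? ln (a : Int) = some (ln[a]'hla) := by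
      rw [PySem.List.pyGet?_natCast]
      exact List.getElem?_eq_getElem hla
    have hai : (a : Int) < (width : Int) := by exact_mod_cast hlt
    set c := ln[a]'hla with hc
    by_cases hd : PySem.Chars.isdigit c
    · -- digit column: extend the run
      rcases start with _ | s0
      · have hcur : cur = [] := hst.mp rfl
        subst hcur
        have hstepv : pvAStep ln (width : Int) row (nums, [], none) (a : Int)
            = (nums, [c], some (a : Int)) := by
          simp [pvAStep, hai, hpg, hd]
        rw [hstepv,
          foldA_eq ln width row hw (a + 1) (by omega) [c] (some (a : Int)) (by simp) nums,
          hrest, hgetc]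
        simp [pvCont, pvEmit, hd]
      · have hcur : cur ≠ [] := by
          intro hcn; exact absurd (hst.mpr hcn) (by simp)
        have hstepv : pvAStep ln (width : Int) row (nums, cur, some s0) (a : Int)
            = (nums, cur ++ [c], some s0) := by
          simp [pvAStep, hai, hpg, hd]
        rw [hstepv,
          foldA_eq ln width row hw (a + 1) (by omega) (cur ++ [c]) (some s0) (by simp) nums,
          hrest, hgetc]
        set k := pvRunLen ((ln.take width).drop (a + 1)) with hk
        have hkk : pvRunLen (c :: (ln.take width).drop (a + 1)) = k + 1 := by
          simp [pvRunLen, hd, hk]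
        have h1 : a + (k + 1) = a + 1 + k := by omega
        simp only [pvCont, hkk, List.take_succ_cons, List.drop_succ_cons, h1]
        simp [List.append_assoc, ← hk]
    · -- non-digit column
      rcases start with _ | s0
      · have hcur : cur = [] := hst.mp rfl
        subst hcur
        have hstepv : pvAStep ln (width : Int) row (nums, [], none) (a : Int)
            = (nums, [], none) := by
          simp [pvAStep, hpg, hd]
        rw [hstepv,
          foldA_eq ln width row hw (a + 1) (by omega) [] none (by simp) nums,
          hrest, hgetc]
        simp [pvCont, pvEmit, hd]
      · have hcur : cur ≠ [] := by
          intro hcn; exact absurd (hst.mpr hcn) (by simp)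
        have hstepv : pvAStep ln (width : Int) row (nums, cur, some s0) (a : Int)
            = (nums ++ [((PySem.Int.ofChars? cur).getD 0, row, s0, (a : Int) - 1)],
               [], none) := by
          simp [pvAStep, hpg, hd, hcur]
        rw [hstepv,
          foldA_eq ln width row hw (a + 1) (by omega) [] none (by simp) _,
          hrest, hgetc]
        simp [pvCont, pvEmit, pvRunLen, hd]
termination_by width - a

-- ===== VERDICT (by name: the statement is the Claim_ definition above) =====
theorem find_numbers_with_positions_spec : Claim_equal_find_numbers_with_positions := by
  intro grid _ hpre
  obtain ⟨hne, hall⟩ := hpre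
  unfold Spec_find_numbers_with_positions
  unfold find_numbers_with_positions find_numbers_with_positions_alt
  dsimp only
  set w : Nat := ((PySem.List.pyGet? grid 0).getD "").toList.length with hwdef
  have hhead : (PySem.List.pyGet? grid 0).getD "" = grid.headD "" := by
    cases grid with
    | nil => exact absurd rfl hne
    | cons g gs => simp
  -- A side: each row's inner fold is pvEmit of that row's width-prefix
  have hA : ∀ (acc : List (Int × Int × Int × Int)) (row : Int),
      row ∈ PySem.List.pyRange 0 (grid.length : Int) 1 →
      ((PySem.List.pyRange 0 ((w : Int) + 1) 1).foldl
          (pvAStep (((PySem.List.pyGet? grid row).getD "").toList) (w : Int) row)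
          (acc, ([] : List Char), (none : Option Int))).1
        = acc ++ pvEmit row ((((PySem.List.pyGet? grid row).getD "").toList).take w) 0 := by
    intro acc row hrow
    rw [PySem.List.mem_pyRange_one] at hrow
    obtain ⟨h0, hlen⟩ := hrow
    lift row to ℕ using h0 with k hk
    have hklen : k < grid.length := by exact_mod_cast hlen
    have hline : (PySem.List.pyGet? grid (k : Int)).getD "" = grid[k] := by
      rw [PySem.List.pyGet?_natCast, List.getElem?_eq_getElem hklen]
      rfl
    have hwle : w ≤ (grid[k].toList).length := by
      have := hall grid[k] (List.getElem_mem hklen)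
      rwa [hwdef, hhead]
    have := foldA_eq (grid[k].toList) w (k : Int) hwle 0 (by omega) [] none (by simp) acc
    rw [hline]
    simpa using this
  rw [PySem.List.foldl_congr_mem _ _
      (fun acc (row : Int) =>
        acc ++ pvEmit row ((((PySem.List.pyGet? grid row).getD "").toList).take w) 0)
      _ hA]
  rw [PySem.List.foldl_append_eq_flatMap, PySem.List.foldl_append_eq_flatMap]
  rw [PySem.List.enumerate_eq_map_pyRange (d := ""), List.flatMap_map]
  have hlen2 : PySem.List.len grid = (grid.length : Int) := rfl
  have hgd : ∀ (a : Int), PySem.List.pyGetD grid a "" = (PySem.List.pyGet? grid a).getD "" :=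
    fun _ => rfl
  simp only [hlen2, hgd, pvBGo_full]

theorem find_numbers_with_positions_raises : Claim_raises_find_numbers_with_positions := by
  unfold Claim_raises_find_numbers_with_positions
  refine ⟨?_, by decide⟩
  rintro grid _ ⟨hne, s, hs, hlt⟩ ⟨_, hall⟩
  exact absurd (hall s hs) (by omega)

-- witness self-check: the crash-fix witness really lies in Raises_ and B's port really returns the stated value there
theorem pvRaisesWitness_ok :
    Raises_find_numbers_with_positions pvRaiseWitness_find_numbers_with_positions ∧
    find_numbers_with_positions_alt pvRaiseWitness_find_numbers_with_positions
      = pvRaiseWitnessOut_find_numbers_with_positions :=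
  ⟨find_numbers_with_positions_raises.2.2.1, find_numbers_with_positions_raises.2.2.2⟩
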